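-- pv_equiv track=rewrite | github.com/alvarosamp/MatchLLM | scripts/run_e2e_local.py | _split_requirements
-- ===== SOURCE A (Python) =====
-- from typing import Any, Dict, Iterable, List, Tuple
--
-- def _split_requirements(edital_json: Dict[str, Any]) -> Tuple[List[str], List[str]]:
--     reqs = edital_json.get("requisitos") if isinstance(edital_json, dict) else None
--     if not isinstance(reqs, dict):
--         return [], []
--     obrig: List[str] = []
--     opt: List[str] = []
--     for k, regra in reqs.items():
--         if not isinstance(k, str):
--             continue
--         is_obrig = True
--         if isinstance(regra, dict):
--             is_obrig = bool(regra.get("obrigatorio", True))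
--         (obrig if is_obrig else opt).append(k)
--     return sorted(obrig), sorted(opt)
-- ===== SOURCE B (Python) =====
-- from typing import Any, Dict, List, Tuple
--
-- def _split_requirements(edital_json: Dict[str, Any]) -> Tuple[List[str], List[str]]:
--     reqs = edital_json.get("requisitos") if isinstance(edital_json, dict) else None
--     if not isinstance(reqs, dict):
--         return [], []
--     # decorate-sort-split: one sort of (is_optional, key) tuples groups the
--     # mandatory keys (flag False) sorted first, then the optional keys sorted.
--     tagged = sorted(
--         (isinstance(regra, dict) and not bool(regra.get("obrigatorio", True)), k)
--         for k, regra in reqs.items()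
--         if isinstance(k, str)
--     )
--     cut = len(tagged) - sum(flag for flag, _ in tagged)
--     return [k for _, k in tagged[:cut]], [k for _, k in tagged[cut:]]
-- ===== Notes on version B (the rewrite author's own statement) =====
-- stated objective: alternative
-- what changed: B uses decorate-sort-split: it tags each key with an is_optional flag, performs ONE sort of the (flag, key) tuples so mandatory keys group first, and slices the sorted list at a counted boundary, instead of A's insertion-order partition into two accumulator lists followed by two separate sorts.
import Mathlib
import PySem

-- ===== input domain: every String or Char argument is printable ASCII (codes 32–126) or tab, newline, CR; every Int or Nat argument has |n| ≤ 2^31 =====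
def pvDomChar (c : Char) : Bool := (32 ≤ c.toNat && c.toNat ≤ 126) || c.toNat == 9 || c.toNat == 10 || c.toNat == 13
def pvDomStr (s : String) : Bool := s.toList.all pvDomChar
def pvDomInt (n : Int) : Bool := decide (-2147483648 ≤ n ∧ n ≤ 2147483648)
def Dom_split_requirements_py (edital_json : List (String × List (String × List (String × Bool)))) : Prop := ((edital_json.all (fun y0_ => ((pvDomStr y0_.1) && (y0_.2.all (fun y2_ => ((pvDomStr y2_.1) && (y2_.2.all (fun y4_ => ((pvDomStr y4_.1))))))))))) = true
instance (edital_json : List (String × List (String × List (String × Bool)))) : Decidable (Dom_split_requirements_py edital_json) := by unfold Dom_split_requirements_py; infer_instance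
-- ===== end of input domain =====

-- B replaces A's partition-then-two-sorts by decorate-sort-split: one sort of (is_optional, key)
-- tuples groups mandatory keys first, then a slice at a computed boundary (objective: alternative).


-- ===== PORT A =====
-- Under the typed convention every key is a str and every regra is a dict, so the
-- isinstance guards of the Python are always true and the 'continue' branch never fires.
def split_requirements_py (edital_json : List (String × List (String × List (String × Bool)))) : List String × List String :=
  match (PySem.Dict.mk edital_json).get? "requisitos" with
  | none => ([], [])
  | some reqs =>
      let acc := reqs.foldl
        (fun (acc : List String × List String) kr =>
          let is_obrig : Bool := (PySem.Dict.mk kr.2).getD "obrigatorio" true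
          if is_obrig then (acc.1 ++ [kr.1], acc.2) else (acc.1, acc.2 ++ [kr.1]))
        ([], [])
      (PySem.List.sorted acc.1 (fun x => x) false, PySem.List.sorted acc.2 (fun x => x) false)

-- ===== PORT B =====
-- Source B tags each key with its is_optional flag, sorts the (flag, key) tuples once
-- (tuple key -> PySem.List.sorted2), and slices the sorted list at the boundary
-- cut = len - sum(flags); the sum of Python bools is the literal foldl below.
def split_requirements_py_alt (edital_json : List (String × List (String × List (String × Bool)))) : List String × List String :=
  match (PySem.Dict.mk edital_json).get? "requisitos" with
  | none => ([], [])
  | some reqs =>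
      let tagged := PySem.List.sorted2
        (reqs.map (fun kr => (!((PySem.Dict.mk kr.2).getD "obrigatorio" true), kr.1)))
        (fun t => t.1) (fun t => t.2) false
      let cut : Int := (tagged.length : Int) -
        (tagged.foldl (fun (acc : Int) t => acc + (if t.1 then 1 else 0)) 0)
      ((PySem.List.slice tagged none (some cut)).map (fun t => t.2),
       (PySem.List.slice tagged (some cut) none).map (fun t => t.2))

-- ===== PRECONDITION & SPEC =====
-- Pre_ excludes association lists whose "requisitos" entry carries duplicate keys: such a
-- list represents no Python dict (dicts have unique keys), so A never receives it.
def Pre_split_requirements_py (edital_json : List (String × List (String × List (String × Bool)))) : Prop :=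
  (((((PySem.Dict.mk edital_json).get? "requisitos").getD []).map Prod.fst)).Nodup
instance (edital_json : List (String × List (String × List (String × Bool)))) : Decidable (Pre_split_requirements_py edital_json) := by unfold Pre_split_requirements_py; infer_instance

def pvWitness_split_requirements_py : (List (String × List (String × List (String × Bool)))) :=
  [("requisitos", [("b", [("obrigatorio", false)]), ("a", [])])]

def Spec_split_requirements_py (edital_json : List (String × List (String × List (String × Bool)))) (out : List String × List String) : Prop := out = split_requirements_py_alt edital_json
instance (edital_json : List (String × List (String × List (String × Bool)))) (out : List String × List String) : Decidable (Spec_split_requirements_py edital_json out) := by unfold Spec_split_requirements_py; infer_instance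

-- ===== CLAIM (what is proved, stated in full; the proofs are below) =====
def Claim_equal_split_requirements_py : Prop := ∀ (edital_json : List (String × List (String × List (String × Bool)))), Dom_split_requirements_py edital_json → Pre_split_requirements_py edital_json → Spec_split_requirements_py edital_json (split_requirements_py edital_json)

-- ===== LEMMAS AND PROOFS =====

-- A's accumulator loop is a pair of filtered key projections.
theorem pv_foldl_partition (reqs : List (String × List (String × Bool)))
    (o p : List String) :
    reqs.foldl
      (fun (acc : List String × List String) kr =>
        let is_obrig : Bool := (PySem.Dict.mk kr.2).getD "obrigatorio" true
        if is_obrig then (acc.1 ++ [kr.1], acc.2) else (acc.1, acc.2 ++ [kr.1]))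
      (o, p)
    = (o ++ (reqs.filter (fun kr => (PySem.Dict.mk kr.2).getD "obrigatorio" true)).map Prod.fst,
       p ++ (reqs.filter (fun kr => !(PySem.Dict.mk kr.2).getD "obrigatorio" true)).map Prod.fst) := by
  induction reqs generalizing o p with
  | nil => simp
  | cons hd tl ih =>
      by_cases h : ((PySem.Dict.mk hd.2).getD "obrigatorio" true) = true
      · simp [List.foldl_cons, h, ih]
      · simp only [Bool.not_eq_true] at h
        simp [List.foldl_cons, h, ih]

-- the tuple comparison of sorted2 is the lexicographic order on Lex (Bool × String)
theorem pv_lt2_eq (a b : Bool × String) :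
    (decide (a.1 < b.1) || (!decide (b.1 < a.1) && decide (a.2 < b.2))) = decide (toLex a < toLex b) := by
  rcases a with ⟨x, s⟩; rcases b with ⟨y, t⟩
  cases x <;> cases y <;> simp [Prod.Lex.lt_iff]

-- sorted2 with the two projections is sorted with the Lex key
theorem pv_sorted2_lex (xs : List (Bool × String)) :
    PySem.List.sorted2 xs (fun t => t.1) (fun t => t.2) false
      = PySem.List.sorted xs (fun t => toLex t) false := by
  unfold PySem.List.sorted2 PySem.List.sorted
  simp only [if_neg (by decide : ¬ (false = true))]
  have h : (fun (a b : Bool × String) =>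
      decide (a.1 < b.1) || (!decide (b.1 < a.1) && decide (a.2 < b.2)))
      = fun a b => decide (toLex a < toLex b) := by
    funext a b; exact pv_lt2_eq a b
  rw [h]

-- the Python sum of flags counts the true flags
theorem pv_sum_flags (l : List (Bool × String)) (acc : Int) :
    l.foldl (fun (acc : Int) t => acc + (if t.1 then 1 else 0)) acc
      = acc + (l.countP (fun t => t.1) : Int) := by
  induction l generalizing acc with
  | nil => simp
  | cons hd tl ih =>
      by_cases h : hd.1 = true <;> simp [List.foldl_cons, h, ih]; ring

-- nodup + nondecreasing = strictly increasing
theorem pv_pairwise_lt_of_nodup {l : List String}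
    (h1 : l.Pairwise (fun a b => a ≤ b)) (h2 : l.Nodup) :
    l.Pairwise (fun a b => a < b) :=
  (h1.and h2).imp (fun h => lt_of_le_of_ne h.1 h.2)

-- the sorted tagged list is sorted-mandatory (flag false) ++ sorted-optional (flag true)
theorem pv_sorted_tagged (reqs : List (String × List (String × Bool)))
    (hnd : (reqs.map Prod.fst).Nodup) :
    PySem.List.sorted (reqs.map (fun kr => (!((PySem.Dict.mk kr.2).getD "obrigatorio" true), kr.1)))
        (fun t => toLex t) false
      = (PySem.List.sorted ((reqs.filter (fun kr => (PySem.Dict.mk kr.2).getD "obrigatorio" true)).map Prod.fst) (fun x => x) false).map (fun k => (false, k))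
        ++ (PySem.List.sorted ((reqs.filter (fun kr => !((PySem.Dict.mk kr.2).getD "obrigatorio" true))).map Prod.fst) (fun x => x) false).map (fun k => (true, k)) := by
  set p : (String × List (String × Bool)) → Bool :=
    fun kr => (PySem.Dict.mk kr.2).getD "obrigatorio" true with hp
  set A0 : List String := (reqs.filter p).map Prod.fst with hA0
  set A1 : List String := (reqs.filter (fun kr => !p kr)).map Prod.fst with hA1
  set O := PySem.List.sorted A0 (fun x => x) false with hO
  set P := PySem.List.sorted A1 (fun x => x) false with hP
  apply PySem.List.sorted_eq_of_perm_of_pairwise_lt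
  · -- permutation
    have h0 : (reqs.map (fun kr => (!(p kr), kr.1))).filter (fun t => !t.1)
        = A0.map (fun k => (false, k)) := by
      rw [List.filter_map]
      have : reqs.filter ((fun (t : Bool × String) => !t.1) ∘ (fun kr => (!(p kr), kr.1)))
          = reqs.filter p := by
        apply List.filter_congr; intro kr _; simp [Function.comp]
      rw [this, hA0, List.map_map]
      apply List.map_congr_left
      intro kr hm
      have := List.of_mem_filter hm
      simp [Function.comp, this]
    have h1 : (reqs.map (fun kr => (!(p kr), kr.1))).filter (fun t => t.1)
        = A1.map (fun k => (true, k)) := by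
      rw [List.filter_map]
      have : reqs.filter ((fun (t : Bool × String) => t.1) ∘ (fun kr => (!(p kr), kr.1)))
          = reqs.filter (fun kr => !p kr) := by
        apply List.filter_congr; intro kr _; simp [Function.comp]
      rw [this, hA1, List.map_map]
      apply List.map_congr_left
      intro kr hm
      have := List.of_mem_filter hm
      simp only [Bool.not_eq_true'] at this
      simp [Function.comp, this]
    calc (O.map (fun k => ((false : Bool), k)) ++ P.map (fun k => ((true : Bool), k))).Perm
          (A0.map (fun k => ((false : Bool), k)) ++ A1.map (fun k => ((true : Bool), k))) := by
            exact List.Perm.append ((PySem.List.sorted_perm A0 (fun x => x) false).map _)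
              ((PySem.List.sorted_perm A1 (fun x => x) false).map _)
      _ = (reqs.map (fun kr => (!(p kr), kr.1))).filter (fun t => !t.1)
            ++ (reqs.map (fun kr => (!(p kr), kr.1))).filter (fun t => t.1) := by rw [h0, h1]
      _ |>.Perm (reqs.map (fun kr => (!(p kr), kr.1))) := by
            have := List.filter_append_perm (fun (t : Bool × String) => !t.1)
              (reqs.map (fun kr => (!(p kr), kr.1)))
            simpa using this
  · -- strictly increasing in the Lex key
    have hsub0 : A0.Nodup := by
      rw [hA0]
      exact hnd.sublist (List.Sublist.map Prod.fst List.filter_sublist)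
    have hsub1 : A1.Nodup := by
      rw [hA1]
      exact hnd.sublist (List.Sublist.map Prod.fst List.filter_sublist)
    have hO' : O.Pairwise (fun a b => a < b) :=
      pv_pairwise_lt_of_nodup (PySem.List.sorted_pairwise A0 (fun x => x))
        ((PySem.List.sorted_perm A0 (fun x => x) false).nodup_iff.mpr hsub0)
    have hP' : P.Pairwise (fun a b => a < b) :=
      pv_pairwise_lt_of_nodup (PySem.List.sorted_pairwise A1 (fun x => x))
        ((PySem.List.sorted_perm A1 (fun x => x) false).nodup_iff.mpr hsub1)
    rw [List.pairwise_append]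
    refine ⟨?_, ?_, ?_⟩
    · rw [List.pairwise_map]
      exact hO'.imp (fun h => by simp [Prod.Lex.lt_iff, h])
    · rw [List.pairwise_map]
      exact hP'.imp (fun h => by simp [Prod.Lex.lt_iff, h])
    · intro a ha b hb
      rcases List.mem_map.mp ha with ⟨k, _, rfl⟩
      rcases List.mem_map.mp hb with ⟨k', _, rfl⟩
      simp [Prod.Lex.lt_iff]

-- ===== VERDICT (by name: the statement is the Claim_ definition above) =====
theorem split_requirements_py_spec : Claim_equal_split_requirements_py := by
  intro e _hdom hpre
  unfold Spec_split_requirements_py split_requirements_py split_requirements_py_alt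
  cases hg : (PySem.Dict.mk e).get? "requisitos" with
  | none => rfl
  | some reqs =>
      unfold Pre_split_requirements_py at hpre
      rw [hg] at hpre
      simp only [Option.getD_some] at hpre
      simp only [pv_foldl_partition, List.nil_append]
      rw [pv_sorted2_lex, pv_sorted_tagged reqs hpre]
      set O := PySem.List.sorted ((reqs.filter (fun kr => (PySem.Dict.mk kr.2).getD "obrigatorio" true)).map Prod.fst) (fun x => x) false with hO
      set P := PySem.List.sorted ((reqs.filter (fun kr => !((PySem.Dict.mk kr.2).getD "obrigatorio" true))).map Prod.fst) (fun x => x) false with hP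
      set tagged := O.map (fun k => ((false : Bool), k)) ++ P.map (fun k => ((true : Bool), k)) with ht
      have hcount : tagged.countP (fun t => t.1) = P.length := by
        rw [ht, List.countP_append, List.countP_map, List.countP_map]
        have c1 : List.countP ((fun (t : Bool × String) => t.1) ∘ fun k => ((false : Bool), k)) O = 0 := by
          simp [List.countP_eq_zero]
        have c2 : List.countP ((fun (t : Bool × String) => t.1) ∘ fun k => ((true : Bool), k)) P = P.length := by
          simp [List.countP_eq_length]
        rw [c1, c2]
        omega
      have hlen : tagged.length = O.length + P.length := by
        rw [ht]; simp
      have hcut : (tagged.length : Int) -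
          (tagged.foldl (fun (acc : Int) t => acc + (if t.1 then 1 else 0)) 0)
          = ((O.length : Nat) : Int) := by
        rw [pv_sum_flags, hcount, hlen]
        push_cast; ring
      rw [hcut, PySem.List.slice_to_natCast, PySem.List.slice_from_natCast]
      have htake : tagged.take O.length = O.map (fun k => ((false : Bool), k)) := by
        rw [ht]
        have : O.length = (O.map (fun k => ((false : Bool), k))).length := by simp
        rw [this, List.take_left]
      have hdrop : tagged.drop O.length = P.map (fun k => ((true : Bool), k)) := by
        rw [ht]
        have : O.length = (O.map (fun k => ((false : Bool), k))).length := by simp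
        rw [this, List.drop_left]
      rw [htake, hdrop, List.map_map, List.map_map]
      simp
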